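-- pv_equiv track=rewrite | github.com/XindanZhang/Data_process | mei60hangbaohan12lei.py | distribute_lines_equally
-- ===== SOURCE A (Python) =====
-- def distribute_lines_equally(file_to_lines, batch_size):
--     # 计算每个类别需要多少行
--     num_files = len(file_to_lines)
--     lines_per_file = batch_size // num_files
--
--     # 确保每个60行的块都有来自每个类别的行
--     output_lines = []
--     while True:
--         # 对每个文件进行操作
--         for file, lines in list(file_to_lines.items()):
--             # 选择lines_per_file行，或者如果不够，选择剩余的所有行
--             selected_lines = lines[:lines_per_file]
--             output_lines.extend(selected_lines)
--             # 更新字典中剩余的行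
--             file_to_lines[file] = lines[lines_per_file:]
--             # 如果该文件的行已经用完，从字典中移除
--             if not file_to_lines[file]:
--                 del file_to_lines[file]
--         # 如果所有文件的行都用完了，就退出循环
--         if not file_to_lines:
--             break
--     return output_lines
-- ===== SOURCE B (Python) =====
-- def distribute_lines_equally(file_to_lines, batch_size):
--     lines_per_file = batch_size // len(file_to_lines)
--     items = list(file_to_lines.items())
--     file_to_lines.clear()  # A ends with the dict emptied; keep that side effect
--     maxlen = 0
--     for _, lines in items:
--         maxlen = max(maxlen, len(lines))
--     rounds = 0 if maxlen == 0 else -(-maxlen // lines_per_file)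
--     out = []
--     for r in range(rounds):
--         for _, lines in items:
--             out.extend(lines[r * lines_per_file:(r + 1) * lines_per_file])
--     return out
-- ===== Notes on version B (the rewrite author's own statement) =====
-- stated objective: faster
-- what changed: Instead of repeatedly re-slicing and re-storing each file's remaining lines in the dict round after round (copying every tail), B computes the number of rounds once from the maximum file length and emits each round's chunk directly with per-round index slices lines[r*k:(r+1)*k] over the untouched snapshot, a single linear pass with no tail copying.
import Mathlib
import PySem

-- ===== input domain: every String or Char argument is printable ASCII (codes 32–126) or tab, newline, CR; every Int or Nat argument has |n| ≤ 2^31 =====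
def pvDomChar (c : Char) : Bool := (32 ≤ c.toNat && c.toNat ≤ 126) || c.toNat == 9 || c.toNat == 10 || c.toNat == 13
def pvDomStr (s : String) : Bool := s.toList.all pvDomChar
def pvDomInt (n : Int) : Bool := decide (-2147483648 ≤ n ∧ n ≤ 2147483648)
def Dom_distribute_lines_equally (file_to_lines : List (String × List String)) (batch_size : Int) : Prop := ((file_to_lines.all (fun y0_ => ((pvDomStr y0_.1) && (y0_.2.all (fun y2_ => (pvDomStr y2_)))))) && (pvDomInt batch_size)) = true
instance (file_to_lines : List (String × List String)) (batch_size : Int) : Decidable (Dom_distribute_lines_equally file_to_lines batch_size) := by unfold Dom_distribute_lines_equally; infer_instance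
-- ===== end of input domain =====

-- B replaces A's round-after-round dict mutation (re-slicing and re-storing every file's
-- remaining tail each round) by a single pass over round indices with direct slices of the
-- untouched snapshot. Equivalence is about the RETURN value; both Pythons leave the
-- argument dict emptied (A by deletions, B by an explicit clear()).

-- ===== PORT A =====
-- Hand ports of Python dict mutation on an insertion-ordered association list with unique
-- keys (Pre_ excludes duplicate keys, which cannot arise from a Python dict); exact there:
-- d[k] = v overwrites the first matching key in place (appends if absent); del d[k] removes it.
def pvDictSet (d : List (String × List String)) (k : String) (v : List String) : List (String × List String) :=
  match d with
  | [] => [(k, v)]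
  | (k', v') :: rest => if k' = k then (k', v) :: rest else (k', v') :: pvDictSet rest k v
def pvDictDel (d : List (String × List String)) (k : String) : List (String × List String) :=
  match d with
  | [] => []
  | (k', v') :: rest => if k' = k then rest else (k', v') :: pvDictDel rest k
def pvDictGet? (d : List (String × List String)) (k : String) : Option (List String) :=
  match d with
  | [] => none
  | (k', v') :: rest => if k' = k then some v' else pvDictGet? rest k

-- the body of the 'for file, lines in list(file_to_lines.items())' loop, over the snapshot
def pvRound (lpf : Int) (snapshot : List (String × List String))
    (out : List String) (d : List (String × List String)) :
    List String × List (String × List String) :=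
  match snapshot with
  | [] => (out, d)
  | (file, lines) :: rest =>
      let selected := PySem.List.slice lines none (some lpf)
      let d1 := pvDictSet d file (PySem.List.slice lines (some lpf) none)
      let d2 := if pvDictGet? d1 file = some [] then pvDictDel d1 file else d1
      pvRound lpf rest (out ++ selected) d2


-- the 'while True' loop; the fuel (total number of lines + 1) is a totality guard only:
-- under Pre_ it is never exhausted (A diverges exactly where Pre_ excludes)
def pvLoop (lpf : Int) (fuel : Nat) (out : List String) (d : List (String × List String)) : List String :=
  match fuel with
  | 0 => out
  | fuel + 1 =>
      let r := pvRound lpf d out d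
      if r.2 = [] then r.1 else pvLoop lpf fuel r.1 r.2


def distribute_lines_equally (file_to_lines : List (String × List String)) (batch_size : Int) : List String :=
  let lines_per_file := PySem.Int.floordiv batch_size file_to_lines.length
  pvLoop lines_per_file ((file_to_lines.map (fun p => p.2.length)).sum + 1) [] file_to_lines

-- ===== PORT B =====
def distribute_lines_equally_alt (file_to_lines : List (String × List String)) (batch_size : Int) : List String :=
  let lines_per_file := PySem.Int.floordiv batch_size file_to_lines.length
  let maxlen : Int := file_to_lines.foldl (fun acc p => max acc (p.2.length : Int)) 0
  let rounds : Int := if maxlen = 0 then 0 else -(PySem.Int.floordiv (-maxlen) lines_per_file)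
  (PySem.List.pyRange 0 rounds 1).foldl
    (fun out r =>
      file_to_lines.foldl
        (fun out p => out ++ PySem.List.slice p.2 (some (r * lines_per_file)) (some ((r + 1) * lines_per_file)))
        out)
    []

-- ===== PRECONDITION & SPEC =====
-- Pre_ excludes: the empty dict (ZeroDivisionError); inputs where batch_size // len < 1 while
-- some file still has lines (A loops forever); and association lists with duplicate keys,
-- which cannot arise from a Python dict.
def Pre_distribute_lines_equally (file_to_lines : List (String × List String)) (batch_size : Int) : Prop :=
  file_to_lines ≠ [] ∧ (file_to_lines.map Prod.fst).Nodup ∧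
    (1 ≤ PySem.Int.floordiv batch_size file_to_lines.length ∨ ∀ p ∈ file_to_lines, p.2 = [])
instance (file_to_lines : List (String × List String)) (batch_size : Int) : Decidable (Pre_distribute_lines_equally file_to_lines batch_size) := by unfold Pre_distribute_lines_equally; infer_instance

def pvWitness_distribute_lines_equally : (List (String × List String)) × Int :=
  ([("a", ["x", "y"]), ("b", ["z"])], 2)

def Spec_distribute_lines_equally (file_to_lines : List (String × List String)) (batch_size : Int) (out : List String) : Prop := out = distribute_lines_equally_alt file_to_lines batch_size
instance (file_to_lines : List (String × List String)) (batch_size : Int) (out : List String) : Decidable (Spec_distribute_lines_equally file_to_lines batch_size out) := by unfold Spec_distribute_lines_equally; infer_instance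

-- ===== CLAIM (what is proved, stated in full; the proofs are below) =====
def Claim_equal_distribute_lines_equally : Prop := ∀ (file_to_lines : List (String × List String)) (batch_size : Int), Dom_distribute_lines_equally file_to_lines batch_size → Pre_distribute_lines_equally file_to_lines batch_size → Spec_distribute_lines_equally file_to_lines batch_size (distribute_lines_equally file_to_lines batch_size)

-- ===== LEMMAS AND PROOFS =====

-- proof-only helpers: the state of A's dict after k rounds relative to the original
-- snapshot (pvG), what round k emits (pvRow), the longest file (pvM), the round count (pvR)
def pvG (L : Nat) (s : List (String × List String)) (k : Nat) : List (String × List String) :=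
  (s.map (fun p => (p.1, p.2.drop (k * L)))).filter (fun p => !p.2.isEmpty)

def pvRow (L : Nat) (s : List (String × List String)) (k : Nat) : List String :=
  (s.map (fun p => (p.2.drop (k * L)).take L)).flatten

def pvM (s : List (String × List String)) : Nat :=
  s.foldr (fun p acc => max p.2.length acc) 0

def pvR (L M : Nat) : Nat := (M + L - 1) / L


theorem pvDictSet_append (pref rest : List (String × List String)) (f : String)
    (ls v : List String) (hf : f ∉ pref.map Prod.fst) :
    pvDictSet (pref ++ (f, ls) :: rest) f v = pref ++ (f, v) :: rest := by
  induction pref with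
  | nil => simp [pvDictSet]
  | cons p t ih =>
      obtain ⟨k', v'⟩ := p
      simp only [List.map_cons, List.mem_cons, not_or] at hf
      simp only [List.cons_append, pvDictSet]
      rw [if_neg (fun h : k' = f => hf.1 h.symm), ih hf.2]

theorem pvDictGet?_append (pref rest : List (String × List String)) (f : String)
    (v : List String) (hf : f ∉ pref.map Prod.fst) :
    pvDictGet? (pref ++ (f, v) :: rest) f = some v := by
  induction pref with
  | nil => simp [pvDictGet?]
  | cons p t ih =>
      obtain ⟨k', v'⟩ := p
      simp only [List.map_cons, List.mem_cons, not_or] at hf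
      simp only [List.cons_append, pvDictGet?]
      rw [if_neg (fun h : k' = f => hf.1 h.symm), ih hf.2]

theorem pvDictDel_append (pref rest : List (String × List String)) (f : String)
    (v : List String) (hf : f ∉ pref.map Prod.fst) :
    pvDictDel (pref ++ (f, v) :: rest) f = pref ++ rest := by
  induction pref with
  | nil => simp [pvDictDel]
  | cons p t ih =>
      obtain ⟨k', v'⟩ := p
      simp only [List.map_cons, List.mem_cons, not_or] at hf
      simp only [List.cons_append, pvDictDel]
      rw [if_neg (fun h : k' = f => hf.1 h.symm), ih hf.2]


theorem pvRound_spec (lpf : Int) (todo : List (String × List String)) :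
    ∀ (pref : List (String × List String)) (out : List String),
    ((pref ++ todo).map Prod.fst).Nodup →
    pvRound lpf todo out (pref ++ todo) =
      (out ++ (todo.map (fun p => PySem.List.slice p.2 none (some lpf))).flatten,
       pref ++ (todo.map (fun p => (p.1, PySem.List.slice p.2 (some lpf) none))).filter
         (fun p => !p.2.isEmpty)) := by
  induction todo with
  | nil => intro pref out _; simp [pvRound]
  | cons hd tl ih =>
      intro pref out hnd
      obtain ⟨f, ls⟩ := hd
      have hnd' := hnd
      rw [List.map_append, List.nodup_append] at hnd'
      have hf : f ∉ pref.map Prod.fst := fun hmem => hnd'.2.2 f hmem f (by simp) rfl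
      have hset := pvDictSet_append pref tl f ls (PySem.List.slice ls (some lpf) none) hf
      have hget := pvDictGet?_append pref tl f (PySem.List.slice ls (some lpf) none) hf
      by_cases hrem : PySem.List.slice ls (some lpf) none = []
      · have hdel := pvDictDel_append pref tl f (PySem.List.slice ls (some lpf) none) hf
        have hnd2 : ((pref ++ tl).map Prod.fst).Nodup := by
          refine List.Nodup.sublist ?_ hnd
          refine List.Sublist.map _ ?_
          exact List.Sublist.append_left (List.sublist_cons_self _ _) _
        simp only [pvRound]
        rw [hset, hget, if_pos (by rw [hrem]), hdel, ih pref _ hnd2]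
        simp [hrem]
      · have hnd2 : (((pref ++ [(f, PySem.List.slice ls (some lpf) none)]) ++ tl).map Prod.fst).Nodup := by
          simpa using hnd
        have hih := ih (pref ++ [(f, PySem.List.slice ls (some lpf) none)]) (out ++ PySem.List.slice ls none (some lpf)) hnd2
        rw [List.append_assoc, List.singleton_append] at hih
        simp only [pvRound]
        rw [hset, hget, if_neg (by simpa using hrem), hih]
        simp [hrem]

theorem pvG_keys_sublist (L : Nat) (s : List (String × List String)) (k : Nat) :
    ((pvG L s k).map Prod.fst).Sublist (s.map Prod.fst) := by
  have h1 : (pvG L s k).Sublist (s.map (fun p => (p.1, p.2.drop (k * L)))) := List.filter_sublist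
  have h2 := h1.map Prod.fst
  simpa using h2

theorem pvG_step (lpf : Int) (h : 0 ≤ lpf) (s : List (String × List String)) (k : Nat) :
    ((pvG lpf.toNat s k).map (fun p => (p.1, PySem.List.slice p.2 (some lpf) none))).filter
      (fun p => !p.2.isEmpty) = pvG lpf.toNat s (k + 1) := by
  induction s with
  | nil => simp [pvG]
  | cons p tl ih =>
      simp only [pvG, List.map_cons, List.filter_cons] at *
      by_cases hp : p.2.drop (k * lpf.toNat) = []
      · have hp' : p.2.drop ((k + 1) * lpf.toNat) = [] := by
          rw [List.drop_eq_nil_iff] at *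
          calc p.2.length ≤ k * lpf.toNat := hp
            _ ≤ (k + 1) * lpf.toNat := Nat.mul_le_mul_right _ (by omega)
        simp [hp, hp', ih]
      · rw [if_pos (by simp [hp])]
        simp only [List.map_cons, List.filter_cons]
        rw [PySem.List.slice_from _ h, List.drop_drop,
          (by ring : k * lpf.toNat + lpf.toNat = (k + 1) * lpf.toNat), ih]

theorem pvG_row (lpf : Int) (h : 0 ≤ lpf) (s : List (String × List String)) (k : Nat) :
    ((pvG lpf.toNat s k).map (fun p => PySem.List.slice p.2 none (some lpf))).flatten
      = pvRow lpf.toNat s k := by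
  induction s with
  | nil => simp [pvG, pvRow]
  | cons p tl ih =>
      simp only [pvG, pvRow, List.map_cons, List.filter_cons, List.flatten_cons] at *
      by_cases hp : p.2.drop (k * lpf.toNat) = []
      · simp [hp, ih]
      · rw [if_pos (by simpa using hp)]
        simp only [List.map_cons, List.flatten_cons]
        rw [PySem.List.slice_to _ h, ih]

theorem pvG_eq_nil_iff (L : Nat) (s : List (String × List String)) (k : Nat) :
    pvG L s k = [] ↔ ∀ p ∈ s, p.2.length ≤ k * L := by
  induction s with
  | nil => simp [pvG]
  | cons p tl ih =>
      simp only [pvG] at ih ⊢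
      simp only [List.map_cons, List.filter_cons]
      by_cases hp : p.2.drop (k * L) = []
      · rw [if_neg (by simp [hp]), ih]
        have hlen : p.2.length ≤ k * L := List.drop_eq_nil_iff.mp hp
        simp [hlen]
      · rw [if_pos (by simp [hp])]
        have hlen : ¬ p.2.length ≤ k * L := fun hc => hp (List.drop_eq_nil_iff.mpr hc)
        simp [hlen]

theorem pvM_le_iff (s : List (String × List String)) (m : Nat) :
    pvM s ≤ m ↔ ∀ p ∈ s, p.2.length ≤ m := by
  induction s with
  | nil => simp [pvM]
  | cons p tl ih =>
      simp only [pvM, List.foldr_cons] at *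
      rw [Nat.max_le, ih]
      simp

theorem pvM_le_sum (s : List (String × List String)) :
    pvM s ≤ (s.map (fun p => p.2.length)).sum := by
  induction s with
  | nil => simp [pvM]
  | cons p tl ih =>
      simp only [pvM, List.foldr_cons, List.map_cons, List.sum_cons] at *
      omega

theorem pvR_le_iff (L M m : Nat) (hL : 0 < L) : pvR L M ≤ m ↔ M ≤ m * L := by
  unfold pvR
  rw [Nat.div_le_iff_le_mul_add_pred hL, Nat.mul_comm]
  omega
theorem pvLoop_spec (lpf : Int) (hlpf : 1 ≤ lpf) (s : List (String × List String))
    (hnd : (s.map Prod.fst).Nodup) :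
    ∀ (fuel j : Nat) (out : List String), pvG lpf.toNat s j ≠ [] →
      pvM s ≤ (j + fuel) * lpf.toNat →
      pvLoop lpf fuel out (pvG lpf.toNat s j) =
        out ++ ((List.range' j (pvR lpf.toNat (pvM s) - j)).map (pvRow lpf.toNat s)).flatten := by
  have hL : 0 < lpf.toNat := by omega
  intro fuel
  induction fuel with
  | zero =>
      intro j out hne hfuel
      exfalso
      exact hne ((pvG_eq_nil_iff _ _ _).mpr ((pvM_le_iff _ _).mp (by simpa using hfuel)))
  | succ fuel ih =>
      intro j out hne hfuel
      have hndj : ((pvG lpf.toNat s j).map Prod.fst).Nodup :=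
        (pvG_keys_sublist _ _ _).nodup hnd
      have hround := pvRound_spec lpf (pvG lpf.toNat s j) [] out (by simpa using hndj)
      rw [List.nil_append] at hround
      have hjR : j < pvR lpf.toNat (pvM s) := by
        by_contra hc
        exact hne ((pvG_eq_nil_iff _ _ _).mpr ((pvM_le_iff _ _).mp
          ((pvR_le_iff _ _ _ hL).mp (by omega))))
      simp only [pvLoop, hround, List.nil_append, pvG_step lpf (by omega) s j,
        pvG_row lpf (by omega) s j]
      by_cases hstop : pvG lpf.toNat s (j + 1) = []
      · rw [if_pos hstop]
        have hR1 : pvR lpf.toNat (pvM s) ≤ j + 1 :=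
          (pvR_le_iff _ _ _ hL).mpr ((pvM_le_iff _ _).mpr ((pvG_eq_nil_iff _ _ _).mp hstop))
        have : pvR lpf.toNat (pvM s) - j = 1 := by omega
        rw [this]
        simp
      · rw [if_neg hstop]
        rw [ih (j + 1) (out ++ pvRow lpf.toNat s j) hstop (by
          have : j + 1 + fuel = j + (fuel + 1) := by omega
          rw [this]; exact hfuel)]
        have : pvR lpf.toNat (pvM s) - j = (pvR lpf.toNat (pvM s) - (j + 1)) + 1 := by omega
        rw [this, List.range'_succ]
        simp

theorem pvMaxFold (s : List (String × List String)) :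
    ∀ (a : Int), 0 ≤ a → s.foldl (fun acc p => max acc (p.2.length : Int)) a = max a (pvM s) := by
  induction s with
  | nil => intro a ha; simp [pvM]; omega
  | cons p tl ih =>
      intro a ha
      simp only [List.foldl_cons, pvM, List.foldr_cons, ih (max a (p.2.length : Int)) (by positivity)]
      push_cast
      rw [max_assoc]

theorem pyRange_zero_R (R : Nat) : PySem.List.pyRange 0 (R:Int) 1 = List.map (fun k : Nat => (k : Int)) (List.range R) := by
  rw [PySem.List.pyRange_one]
  simp

theorem pvRow_eq_nil_of_empty (L : Nat) (s : List (String × List String))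
    (he : ∀ p ∈ s, p.2 = []) (k : Nat) : pvRow L s k = [] := by
  induction s with
  | nil => simp [pvRow]
  | cons p tl ih =>
      simp only [pvRow, List.map_cons, List.flatten_cons] at *
      rw [he p (by simp), ih (fun q hq => he q (by simp [hq]))]
      simp

theorem alt_eq (ftl : List (String × List String)) (bs : Int)
    (hlpf : 1 ≤ PySem.Int.floordiv bs ftl.length) :
    distribute_lines_equally_alt ftl bs =
      ((List.range (pvR (PySem.Int.floordiv bs ftl.length).toNat (pvM ftl))).map
        (pvRow (PySem.Int.floordiv bs ftl.length).toNat ftl)).flatten := by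
  set lpf := PySem.Int.floordiv bs ftl.length with hdef
  have hlpfc : ((lpf.toNat : Int)) = lpf := Int.toNat_of_nonneg (by omega)
  set L := lpf.toNat with hLdef
  have hL : 0 < L := by omega
  simp only [distribute_lines_equally_alt, ← hdef]
  rw [pvMaxFold ftl 0 le_rfl]
  have hrounds : (if max (0:Int) (pvM ftl : Int) = 0 then (0:Int)
      else -(PySem.Int.floordiv (-(max (0:Int) (pvM ftl : Int))) lpf)) = (pvR L (pvM ftl) : Int) := by
    by_cases hM : pvM ftl = 0
    · rw [if_pos (by simp [hM])]
      have : pvR L (pvM ftl) = 0 := by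
        rw [hM]; unfold pvR; exact Nat.div_eq_of_lt (by omega)
      rw [this]; rfl
    · rw [if_neg (by simp; omega)]
      have hub : pvM ftl ≤ pvR L (pvM ftl) * L := (pvR_le_iff _ _ _ hL).mp le_rfl
      have hR1 : 1 ≤ pvR L (pvM ftl) := by
        by_contra hc
        have := (pvR_le_iff L (pvM ftl) 0 hL).mp (by omega)
        omega
      have hlb : ¬ pvM ftl ≤ (pvR L (pvM ftl) - 1) * L := by
        intro hc
        have := (pvR_le_iff L (pvM ftl) (pvR L (pvM ftl) - 1) hL).mpr hc
        omega
      rw [show max (0:Int) (pvM ftl : Int) = (pvM ftl : Int) by simp]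
      rw [PySem.Int.neg_floordiv_neg_eq_iff_of_pos (by omega)]
      constructor
      · rw [← hlpfc]
        have : ((pvR L (pvM ftl) : Int) - 1) * (L : Int) = (((pvR L (pvM ftl) - 1) * L : Nat) : Int) := by
          push_cast [hR1]; ring
        rw [this]
        exact_mod_cast (by omega : (pvR L (pvM ftl) - 1) * L < pvM ftl)
      · rw [← hlpfc]
        exact_mod_cast hub
  rw [hrounds, pyRange_zero_R]
  rw [show (fun (out : List String) (r : Int) =>
        ftl.foldl (fun out p => out ++ PySem.List.slice p.2 (some (r * lpf)) (some ((r + 1) * lpf))) out)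
      = (fun (out : List String) (r : Int) =>
        out ++ ftl.flatMap (fun p => PySem.List.slice p.2 (some (r * lpf)) (some ((r + 1) * lpf)))) from
    funext fun out => funext fun r => PySem.List.foldl_append_eq_flatMap _ _ _]
  rw [PySem.List.foldl_append_eq_flatMap, List.nil_append]
  rw [List.flatMap_def, List.map_map]
  congr 1
  refine List.map_congr_left fun k _ => ?_
  have h1 : ((k:Int) * lpf) = ((k * L : Nat) : Int) := by rw [← hlpfc]; push_cast; ring
  have h2 : (((k:Int) + 1) * lpf) = ((k * L + L : Nat) : Int) := by rw [← hlpfc]; push_cast; ring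
  simp only [Function.comp_apply, h1, h2, PySem.List.slice_natCast, Nat.add_sub_cancel_left,
    pvRow, List.flatMap_def]
theorem pvSliceNil (a b : Option Int) : PySem.List.slice ([] : List String) a b = [] := by
  unfold PySem.List.slice; cases a <;> cases b <;> simp [PySem.List.clampIdx]

theorem pvRow0 (lpf : Int) (h : 0 ≤ lpf) (ftl : List (String × List String)) :
    (ftl.map (fun p => PySem.List.slice p.2 none (some lpf))).flatten = pvRow lpf.toNat ftl 0 := by
  unfold pvRow
  congr 1
  refine List.map_congr_left fun p _ => ?_
  rw [PySem.List.slice_to _ h]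
  simp

theorem pvStep0 (lpf : Int) (h : 0 ≤ lpf) (ftl : List (String × List String)) :
    (ftl.map (fun p => (p.1, PySem.List.slice p.2 (some lpf) none))).filter (fun p => !p.2.isEmpty)
      = pvG lpf.toNat ftl 1 := by
  unfold pvG
  congr 1
  refine List.map_congr_left fun p _ => ?_
  rw [PySem.List.slice_from _ h]
  simp


theorem main_eq (ftl : List (String × List String)) (bs : Int)
    (hpre : Pre_distribute_lines_equally ftl bs) :
    distribute_lines_equally ftl bs = distribute_lines_equally_alt ftl bs := by
  obtain ⟨hne, hnd, hcase⟩ := hpre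
  set lpf := PySem.Int.floordiv bs ftl.length with hdef
  have hround := pvRound_spec lpf ftl [] [] (by simpa using hnd)
  rw [List.nil_append] at hround
  rcases hcase with hlpf | hemp
  · set L := lpf.toNat with hLdef
    have hL : 0 < L := by omega
    set S := (ftl.map (fun p => p.2.length)).sum with hSdef
    have hAstart : distribute_lines_equally ftl bs =
        if pvG L ftl 1 = [] then pvRow L ftl 0 else pvLoop lpf S (pvRow L ftl 0) (pvG L ftl 1) := by
      simp only [distribute_lines_equally, ← hdef, ← hSdef, pvLoop, hround,
        pvRow0 lpf (by omega) ftl, pvStep0 lpf (by omega) ftl, List.nil_append]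
      rfl
    rw [alt_eq ftl bs (hdef ▸ hlpf), hAstart]
    by_cases hstop : pvG L ftl 1 = []
    · rw [if_pos hstop]
      have hR1 : pvR L (pvM ftl) ≤ 1 :=
        (pvR_le_iff _ _ _ hL).mpr (by
          have := (pvM_le_iff ftl (1 * L)).mpr (by
            simpa using (pvG_eq_nil_iff L ftl 1).mp hstop)
          omega)
      interval_cases h : pvR L (pvM ftl)
      · have hM0 : pvM ftl = 0 := by
          have := (pvR_le_iff L (pvM ftl) 0 hL).mp (by omega)
          omega
        have hallnil : ∀ p ∈ ftl, p.2 = [] := by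
          intro p hp
          have := (pvM_le_iff ftl 0).mp (by omega) p hp
          simpa [List.length_eq_zero_iff] using this
        simp [pvRow_eq_nil_of_empty L ftl hallnil 0]
      · simp only [List.range_one, List.map_cons, List.map_nil, List.flatten_cons,
          List.flatten_nil, List.append_nil]
        rfl
    · rw [if_neg hstop]
      have hfits : pvM ftl ≤ (1 + S) * L := by
        have h1 := pvM_le_sum ftl
        have h2 : (1 + S) * 1 ≤ (1 + S) * L := Nat.mul_le_mul_left _ hL
        omega
      rw [pvLoop_spec lpf hlpf ftl hnd S 1 (pvRow L ftl 0) hstop (by simpa using hfits)]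
      have hR2 : 1 ≤ pvR L (pvM ftl) := by
        by_contra hc
        have := (pvM_le_iff ftl (1 * L)).mp ((pvR_le_iff _ _ _ hL).mp (by omega))
        exact hstop ((pvG_eq_nil_iff L ftl 1).mpr (by simpa using this))
      rw [List.range_eq_range', show pvR L (pvM ftl) = (pvR L (pvM ftl) - 1) + 1 by omega,
        List.range'_succ]
      simp only [List.map_cons, List.flatten_cons]
      rfl
  · -- all files empty
    have hS0 : (ftl.map (fun p => p.2.length)).sum = 0 := by
      rw [List.sum_eq_zero]
      intro x hx
      obtain ⟨p, hp, rfl⟩ := List.mem_map.mp hx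
      simp [hemp p hp]
    have hA : distribute_lines_equally ftl bs = [] := by
      simp only [distribute_lines_equally, ← hdef, hS0, pvLoop, hround]
      have hout : (ftl.map (fun p => PySem.List.slice p.2 none (some lpf))).flatten = [] := by
        rw [List.flatten_eq_nil_iff]
        intro l hl
        obtain ⟨p, hp, rfl⟩ := List.mem_map.mp hl
        rw [hemp p hp, pvSliceNil]
      have hst : (ftl.map (fun p => (p.1, PySem.List.slice p.2 (some lpf) none))).filter
          (fun p => !p.2.isEmpty) = [] := by
        rw [List.filter_eq_nil_iff]
        intro q hq
        obtain ⟨p, hp, rfl⟩ := List.mem_map.mp hq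
        simp [hemp p hp, pvSliceNil]
      simp [hout, hst]
    have hM0 : pvM ftl = 0 := by
      have := (pvM_le_iff ftl 0).mpr (fun p hp => by simp [hemp p hp])
      omega
    have hB : distribute_lines_equally_alt ftl bs = [] := by
      simp only [distribute_lines_equally_alt, ← hdef]
      rw [pvMaxFold ftl 0 le_rfl, hM0]
      simp
    rw [hA, hB]

-- ===== VERDICT (by name: the statement is the Claim_ definition above) =====
theorem distribute_lines_equally_spec : Claim_equal_distribute_lines_equally := by
  intro ftl bs _ hpre
  exact main_eq ftl bs hpre
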